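-- pv_equiv track=rewrite | github.com/lasha22/GOA-homework | day16/Homework/lesson16hw3.py | custom_replace
-- ===== SOURCE A (Python) =====
-- def custom_replace(string, old_sub, new_sub):
--     result = ''
--     i = 0
--     while i < len(string):
--
--         if string[i:i + len(old_sub)] == old_sub:
--             result += new_sub
--             i += len(old_sub)
--         else:
--             result += string[i]
--             i += 1
--     return result
-- ===== SOURCE B (Python) =====
-- def custom_replace(string, old_sub, new_sub):
--     return string.replace(old_sub, new_sub)
-- ===== Notes on version B (the rewrite author's own statement) =====
-- stated objective: idiomatic
-- what changed: Replaces A's hand-written character-by-character while loop (quadratic slicing) with Python's built-in str.replace, which performs the same leftmost non-overlapping replacement.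
-- outside the precondition, e.g. on custom_replace('ab', '', '-'): A does not finish within the time limit, B returns '-a-b-'; on custom_replace('', '', 'z'): A returns '', B returns 'z'
import Mathlib
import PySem

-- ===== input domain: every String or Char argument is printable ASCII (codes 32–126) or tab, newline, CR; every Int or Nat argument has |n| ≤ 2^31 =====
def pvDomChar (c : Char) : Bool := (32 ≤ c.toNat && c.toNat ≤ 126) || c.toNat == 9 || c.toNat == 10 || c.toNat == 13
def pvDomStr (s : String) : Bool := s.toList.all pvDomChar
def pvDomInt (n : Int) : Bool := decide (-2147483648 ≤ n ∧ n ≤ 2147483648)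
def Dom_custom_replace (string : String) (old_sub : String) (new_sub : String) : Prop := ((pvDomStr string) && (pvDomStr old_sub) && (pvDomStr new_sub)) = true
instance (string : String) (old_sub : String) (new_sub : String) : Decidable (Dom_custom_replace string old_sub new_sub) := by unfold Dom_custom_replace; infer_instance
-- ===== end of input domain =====

-- B replaces A's hand-written char-by-char scan (with repeated slicing) by the built-in
-- str.replace, which performs the identical leftmost non-overlapping replacement (idiomatic).
-- Pre_ excludes old_sub = "" (A diverges on nonempty strings there).


-- ===== PORT A =====
-- A's while loop: at position i, if string[i:i+len(old_sub)] == old_sub append new_sub and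
-- advance by len(old_sub), else copy one char; fuel = remaining length bounds the loop
-- (sufficient whenever old_sub ≠ "", the precondition; A diverges on old_sub = "").
def customReplaceLoopA (old new : List Char) : Nat → List Char → List Char → List Char
  | 0, _, result => result
  | _ + 1, [], result => result
  | fuel + 1, c :: t, result =>
    if (c :: t).take old.length = old then
      customReplaceLoopA old new fuel ((c :: t).drop old.length) (result ++ new)
    else
      customReplaceLoopA old new fuel t (result ++ [c])

def custom_replace (string : String) (old_sub : String) (new_sub : String) : String :=
  String.ofList
    (customReplaceLoopA old_sub.toList new_sub.toList string.toList.length string.toList [])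

-- ===== PORT B =====
def custom_replace_alt (string : String) (old_sub : String) (new_sub : String) : String :=
  PySem.Str.replace string old_sub new_sub

-- ===== PRECONDITION & SPEC =====
-- Pre_ excludes old_sub = "": there A's loop never advances i and diverges on every nonempty
-- string, and on the empty string its '' (the loop never runs) is an accident of the loop bound,
-- where str.replace's new_sub is the other defensible value.
def Pre_custom_replace (string : String) (old_sub : String) (new_sub : String) : Prop :=
  old_sub.toList ≠ []
instance (string : String) (old_sub : String) (new_sub : String) : Decidable (Pre_custom_replace string old_sub new_sub) := by unfold Pre_custom_replace; infer_instance

def pvWitness_custom_replace : String × String × String := ("abcab", "ab", "x")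

def Spec_custom_replace (string : String) (old_sub : String) (new_sub : String) (out : String) : Prop := out = custom_replace_alt string old_sub new_sub
instance (string : String) (old_sub : String) (new_sub : String) (out : String) : Decidable (Spec_custom_replace string old_sub new_sub out) := by unfold Spec_custom_replace; infer_instance

-- ===== CLAIM (what is proved, stated in full; the proofs are below) =====
def Claim_equal_custom_replace : Prop := ∀ (string : String) (old_sub : String) (new_sub : String), Dom_custom_replace string old_sub new_sub → Pre_custom_replace string old_sub new_sub → Spec_custom_replace string old_sub new_sub (custom_replace string old_sub new_sub)

-- ===== LEMMAS AND PROOFS =====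

-- A's accumulator loop computes PySem's replace loop (reversed accumulator), given enough fuel.
theorem customReplaceLoopA_eq_go (old new : List Char) (hold : old ≠ [])
    (fuel : Nat) (l result : List Char) (hf : l.length ≤ fuel) :
    customReplaceLoopA old new fuel l result
      = PySem.Chars.replace.go old new fuel l result.reverse := by
  induction fuel generalizing l result with
  | zero =>
    have : l = [] := List.length_eq_zero_iff.mp (Nat.le_zero.mp hf)
    subst this
    simp [customReplaceLoopA, PySem.Chars.replace.go]
  | succ fuel ih =>
    cases l with
    | nil => simp [customReplaceLoopA, PySem.Chars.replace.go]
    | cons c t =>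
      have hiff : old.isPrefixOf (c :: t) = true ↔ (c :: t).take old.length = old := by
        rw [List.isPrefixOf_iff_prefix, List.prefix_iff_eq_take]; exact eq_comm
      by_cases h : (c :: t).take old.length = old
      · have hpref : old.isPrefixOf (c :: t) = true := hiff.mpr h
        have hlen : old.length ≤ (c :: t).length :=
          (List.prefix_iff_eq_take.mpr h.symm).length_le
        have h1 : 1 ≤ old.length := by
          cases old with
          | nil => exact absurd rfl hold
          | cons _ _ => simp
        have hdrop : ((c :: t).drop old.length).length ≤ fuel := by
          simp only [List.length_drop, List.length_cons] at hf hlen ⊢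
          omega
        simp only [customReplaceLoopA, PySem.Chars.replace.go, h, hpref, if_true]
        rw [ih _ _ hdrop]
        congr 1
        simp
      · have hpref : old.isPrefixOf (c :: t) = false := by
          rw [Bool.eq_false_iff]
          intro hx
          exact h (hiff.mp hx)
        have ht : t.length ≤ fuel := by
          simp only [List.length_cons] at hf
          omega
        simp only [customReplaceLoopA, PySem.Chars.replace.go, h, hpref, if_false, Bool.false_eq_true]
        rw [ih _ _ ht]
        congr 1
        simp

-- ===== VERDICT (by name: the statement is the Claim_ definition above) =====
theorem custom_replace_spec : Claim_equal_custom_replace := by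
  intro s old new _ hpre
  have hold : old.toList ≠ [] := hpre
  unfold Spec_custom_replace custom_replace custom_replace_alt PySem.Str.replace
    PySem.Chars.replace
  rw [if_neg (by simpa [List.isEmpty_iff] using hold)]
  rw [customReplaceLoopA_eq_go _ _ hold _ _ _ (Nat.le_refl _)]
  rfl
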